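-- pv_equiv track=rewrite | github.com/cfd2474/TAKNET-PS_Aggregator | beast-proxy/proxy.py | count_beast_frames
-- ===== SOURCE A (Python) =====
-- BEAST_ESCAPE = 0x1A
--
-- BEAST_TYPES = {0x31, 0x32, 0x33, 0x34, 0x35}
--
-- BEAST_LONG = {0x33, 0x35}  # Mode-S long messages (contain ADS-B/DF17)
--
-- def count_beast_frames(data):
--     """Count Beast message frames and position-capable messages in raw data."""
--     msgs = 0
--     positions = 0
--     i = 0
--     length = len(data)
--     while i < length - 1:
--         if data[i] == BEAST_ESCAPE:
--             next_byte = data[i + 1]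
--             if next_byte == BEAST_ESCAPE:
--                 i += 2
--                 continue
--             if next_byte in BEAST_TYPES:
--                 msgs += 1
--                 if next_byte in BEAST_LONG:
--                     positions += 1
--                 i += 2
--                 continue
--         i += 1
--     return msgs, positions
-- ===== SOURCE B (Python) =====
-- import re
--
-- BEAST_ESCAPE = 0x1A
-- BEAST_TYPES = {0x31, 0x32, 0x33, 0x34, 0x35}
-- BEAST_LONG = {0x33, 0x35}
--
-- # 'E' = escape byte, 'L' = long (position-capable) type, 'T' = other Beast type, '.' = anything else
-- _PAT = re.compile(r'EE|E[LT]')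
--
-- def _sym(b):
--     if b == BEAST_ESCAPE:
--         return 'E'
--     if b in BEAST_LONG:
--         return 'L'
--     if b in BEAST_TYPES:
--         return 'T'
--     return '.'
--
-- def count_beast_frames(data):
--     """Count Beast message frames and position-capable messages in raw data."""
--     s = ''.join(map(_sym, data))
--     msgs = 0
--     positions = 0
--     for m in _PAT.finditer(s):
--         t = m.group()
--         if t == 'EE':
--             continue
--         msgs += 1
--         if t[1] == 'L':
--             positions += 1
--     return msgs, positions
-- ===== Notes on version B (the rewrite author's own statement) =====
-- stated objective: idiomatic
-- what changed: Replaces the manual variable-step index loop with a symbol translation of the data followed by a compiled-regex scan (re.finditer over 'EE|E[LT]') whose non-overlapping left-to-right matching reproduces the escape-pair consumption.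
import Mathlib
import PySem

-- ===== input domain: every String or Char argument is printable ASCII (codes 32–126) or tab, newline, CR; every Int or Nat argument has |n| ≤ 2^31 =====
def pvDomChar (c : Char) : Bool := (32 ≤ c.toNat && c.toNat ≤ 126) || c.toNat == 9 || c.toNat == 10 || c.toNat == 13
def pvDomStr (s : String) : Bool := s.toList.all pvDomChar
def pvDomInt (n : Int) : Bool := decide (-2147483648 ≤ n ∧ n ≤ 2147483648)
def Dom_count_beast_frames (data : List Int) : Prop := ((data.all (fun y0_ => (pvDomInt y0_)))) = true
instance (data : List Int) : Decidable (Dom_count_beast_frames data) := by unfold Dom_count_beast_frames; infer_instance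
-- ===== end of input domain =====

-- B replaces A's variable-step index loop by a symbol translation plus a regex-style
-- non-overlapping pattern scan; same cost, more idiomatic (objective: idiomatic).

-- ===== PORT A =====
-- while loop with Int index i; fuel = data.length bounds the number of iterations
-- (each iteration increases i by ≥ 1), so the fuel guard never fires.
def countLoopA (data : List Int) (fuel : Nat) (i msgs positions : Int) : Int × Int :=
  match fuel with
  | 0 => (msgs, positions)
  | fuel + 1 =>
    if i < (data.length : Int) - 1 then
      if (PySem.List.pyGet? data i).getD 0 = 26 then
        let nb := (PySem.List.pyGet? data (i + 1)).getD 0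
        if nb = 26 then
          countLoopA data fuel (i + 2) msgs positions
        else if nb = 49 ∨ nb = 50 ∨ nb = 51 ∨ nb = 52 ∨ nb = 53 then
          countLoopA data fuel (i + 2) (msgs + 1)
            (if nb = 51 ∨ nb = 53 then positions + 1 else positions)
        else
          countLoopA data fuel (i + 1) msgs positions
      else
        countLoopA data fuel (i + 1) msgs positions
    else (msgs, positions)

def count_beast_frames (data : List Int) : Int × Int :=
  countLoopA data data.length 0 0 0

-- ===== PORT B =====
-- symbol translation: 'E' escape, 'L' long type, 'T' other Beast type, '.' anything else
def symB (b : Int) : Char :=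
  if b = 26 then 'E'
  else if b = 51 ∨ b = 53 then 'L'
  else if b = 49 ∨ b = 50 ∨ b = 52 then 'T'
  else '.'

-- non-overlapping left-to-right scan for the pattern EE | E[LT] (hand port of re.finditer)
def scanB : List Char → Int × Int
  | c1 :: c2 :: rest =>
    if c1 = 'E' ∧ c2 = 'E' then scanB rest
    else if c1 = 'E' ∧ (c2 = 'L' ∨ c2 = 'T') then
      let r := scanB rest
      (r.1 + 1, if c2 = 'L' then r.2 + 1 else r.2)
    else scanB (c2 :: rest)
  | _ => (0, 0)

def count_beast_frames_alt (data : List Int) : Int × Int :=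
  scanB (data.map symB)

-- ===== PRECONDITION & SPEC =====
def Spec_count_beast_frames (data : List Int) (out : Int × Int) : Prop := out = count_beast_frames_alt data
instance (data : List Int) (out : Int × Int) : Decidable (Spec_count_beast_frames data out) := by unfold Spec_count_beast_frames; infer_instance

-- ===== CLAIM (what is proved, stated in full; the proofs are below) =====
def Claim_equal_count_beast_frames : Prop := ∀ (data : List Int), Dom_count_beast_frames data → Spec_count_beast_frames data (count_beast_frames data)

-- ===== LEMMAS AND PROOFS =====

theorem scanB_cons_cons (c1 c2 : Char) (rest : List Char) :
    scanB (c1 :: c2 :: rest) =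
      if c1 = 'E' ∧ c2 = 'E' then scanB rest
      else if c1 = 'E' ∧ (c2 = 'L' ∨ c2 = 'T') then
        ((scanB rest).1 + 1, if c2 = 'L' then (scanB rest).2 + 1 else (scanB rest).2)
      else scanB (c2 :: rest) := by
  rw [scanB]

theorem main_lemma : ∀ (fuel : Nat) (data : List Int) (i : Nat) (m p : Int),
    data.length - i ≤ fuel →
    countLoopA data fuel (i : Int) m p =
      ((scanB ((data.drop i).map symB)).1 + m, (scanB ((data.drop i).map symB)).2 + p) := by
  intro fuel
  induction fuel with
  | zero =>
    intro data i m p hf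
    have hi : data.length ≤ i := by omega
    simp [countLoopA, List.drop_eq_nil_of_le hi, scanB]
  | succ fuel ih =>
    intro data i m p hf
    by_cases hg : (i : Int) < (data.length : Int) - 1
    · have hi1 : i + 1 < data.length := by exact_mod_cast by omega
      have hi : i < data.length := by omega
      have hdrop : data.drop i = data[i] :: data[i+1] :: data.drop (i + 2) := by
        rw [List.drop_eq_getElem_cons hi, List.drop_eq_getElem_cons hi1]
      have e2 : ((i : Int) + 2) = ((i + 2 : Nat) : Int) := by push_cast; ring
      have e1 : ((i : Int) + 1) = ((i + 1 : Nat) : Int) := by push_cast; ring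
      have h1 : PySem.List.pyGet? data (i : Int) = some data[i] := by
        rw [PySem.List.pyGet?_natCast, List.getElem?_eq_getElem hi]
      have h2 : PySem.List.pyGet? data ((i : Int) + 1) = some data[i+1] := by
        rw [e1, PySem.List.pyGet?_natCast, List.getElem?_eq_getElem hi1]
      have hdrop1 : data.drop (i + 1) = data[i+1] :: data.drop (i + 2) := by
        rw [List.drop_eq_getElem_cons hi1]
      rw [countLoopA]
      rw [if_pos hg, h1, h2]
      simp only [Option.getD_some]
      by_cases ha : data[i] = 26
      · rw [if_pos ha]
        by_cases hb : data[i+1] = 26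
        · rw [if_pos hb, e2, ih data (i+2) m p (by omega)]
          have hsa : symB data[i] = 'E' := by simp [symB, ha]
          have hsb : symB data[i+1] = 'E' := by simp [symB, hb]
          rw [hdrop]; simp only [List.map_cons, hsa, hsb, scanB_cons_cons]
          simp
        · rw [if_neg hb]
          by_cases ht : data[i+1] = 49 ∨ data[i+1] = 50 ∨ data[i+1] = 51 ∨ data[i+1] = 52 ∨ data[i+1] = 53
          · rw [if_pos ht, e2, ih data (i+2) _ _ (by omega)]
            have hsa : symB data[i] = 'E' := by simp [symB, ha]
            rw [hdrop]; simp only [List.map_cons, hsa, scanB_cons_cons]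
            rcases ht with h49 | h50 | h51 | h52 | h53 <;>
              simp [symB, *] <;> omega
          · rw [if_neg ht, e1, ih data (i+1) m p (by omega)]
            have hs : symB data[i+1] = '.' := by
              unfold symB; rw [if_neg hb, if_neg (by tauto), if_neg (by tauto)]
            have hsa : symB data[i] = 'E' := by simp [symB, ha]
            rw [hdrop, hdrop1]; simp only [List.map_cons, hsa, hs, scanB_cons_cons]
            simp
      · rw [if_neg ha, e1, ih data (i+1) m p (by omega)]
        have hs : symB data[i] ≠ 'E' := by
          unfold symB; rw [if_neg ha]
          split
          · decide
          · split <;> decide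
        rw [hdrop, hdrop1]; simp only [List.map_cons, scanB_cons_cons]
        rw [if_neg (by simp [hs]), if_neg (by simp [hs])]
    · rw [countLoopA, if_neg hg]
      have hlen : data.length ≤ i + 1 := by exact_mod_cast by omega
      have hshort : (data.drop i).length ≤ 1 := by simp; omega
      have hz : scanB ((data.drop i).map symB) = (0, 0) := by
        rcases hd : data.drop i with _ | ⟨x, _ | ⟨y, t⟩⟩ <;> simp_all [scanB]
      rw [hz]; simp

-- ===== VERDICT (by name: the statement is the Claim_ definition above) =====
theorem count_beast_frames_spec : Claim_equal_count_beast_frames := by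
  intro data _
  unfold Spec_count_beast_frames count_beast_frames count_beast_frames_alt
  have h := main_lemma data.length data 0 0 0 (by omega)
  simpa using h
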